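-- pv_equiv track=rewrite | github.com/anthonruales/Course-Recommendation-System | backend/recommendation_engine.py | _determine_learning_style
-- ===== SOURCE A (Python) =====
-- from typing import List, Dict, Any, Optional, Tuple, Set
--
-- def _determine_learning_style(traits: List[str]) -> Set[str]:
--     """Determine user's learning style from their traits"""
--     learning_styles = set()
--
--     style_mapping = {
--         'visual': ['Visual-learner', 'Aesthetic-sense', 'Digital-art', 'Spatial-thinking'],
--         'hands_on': ['Hands-on', 'Practical', 'Field-work', 'Active', 'Laboratory'],
--         'theoretical': ['Theoretical', 'Research-oriented', 'Abstract-thinking', 'Analytical'],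
--         'social': ['Collaborative', 'Team-centric', 'Extroverted', 'Social'],
--         'independent': ['Independent', 'Introverted', 'Contemplative', 'Self-directed'],
--     }
--
--     for style, style_traits in style_mapping.items():
--         matches = [t for t in traits if t in style_traits]
--         if len(matches) >= 2:
--             learning_styles.add(style)
--         elif len(matches) >= 1:
--             learning_styles.add(style)  # Partial match still counts
--
--     return learning_styles
-- ===== SOURCE B (Python) =====
-- from typing import List, Set
--
-- # Reverse index: each trait string maps to its learning style.
-- # (The five trait lists of the original mapping are pairwise disjoint.)
-- _TRAIT_TO_STYLE = {
--     'Visual-learner': 'visual', 'Aesthetic-sense': 'visual',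
--     'Digital-art': 'visual', 'Spatial-thinking': 'visual',
--     'Hands-on': 'hands_on', 'Practical': 'hands_on', 'Field-work': 'hands_on',
--     'Active': 'hands_on', 'Laboratory': 'hands_on',
--     'Theoretical': 'theoretical', 'Research-oriented': 'theoretical',
--     'Abstract-thinking': 'theoretical', 'Analytical': 'theoretical',
--     'Collaborative': 'social', 'Team-centric': 'social',
--     'Extroverted': 'social', 'Social': 'social',
--     'Independent': 'independent', 'Introverted': 'independent',
--     'Contemplative': 'independent', 'Self-directed': 'independent',
-- }
--
-- _STYLES = ('visual', 'hands_on', 'theoretical', 'social', 'independent')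
--
-- def _determine_learning_style(traits: List[str]) -> Set[str]:
--     """Determine user's learning style from their traits"""
--     matched = set()
--     for t in traits:
--         style = _TRAIT_TO_STYLE.get(t)
--         if style is not None:
--             matched.add(style)
--     # emit the matched styles in the canonical style order
--     return {s for s in _STYLES if s in matched}
-- ===== Notes on version B (the rewrite author's own statement) =====
-- stated objective: faster
-- what changed: B inverts the traversal: a precomputed reverse-index dict maps each trait to its style, a single pass over the input traits collects matched styles via O(1) lookups, and the five styles are then filtered by membership in that set, replacing A's per-style list-comprehension scan of all traits with count thresholds.
import Mathlib
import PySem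

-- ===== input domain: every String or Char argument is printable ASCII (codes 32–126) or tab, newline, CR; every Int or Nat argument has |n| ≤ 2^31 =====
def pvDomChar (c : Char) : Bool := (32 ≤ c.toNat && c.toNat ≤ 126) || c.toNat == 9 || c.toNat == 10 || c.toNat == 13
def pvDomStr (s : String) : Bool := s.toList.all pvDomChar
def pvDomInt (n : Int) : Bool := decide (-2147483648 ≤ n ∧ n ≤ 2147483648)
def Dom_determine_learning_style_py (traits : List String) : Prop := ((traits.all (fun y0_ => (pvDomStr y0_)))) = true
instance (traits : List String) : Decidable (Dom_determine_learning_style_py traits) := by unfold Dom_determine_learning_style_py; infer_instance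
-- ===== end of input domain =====

-- B inverts the traversal: one pass over traits with a reverse-index dict lookup, instead of A's per-style scan of all traits.

-- ===== PORT A =====
-- the dict literal style_mapping, iterated in insertion order
def pvStyleMapping : List (String × List String) :=
  [("visual", ["Visual-learner", "Aesthetic-sense", "Digital-art", "Spatial-thinking"]),
   ("hands_on", ["Hands-on", "Practical", "Field-work", "Active", "Laboratory"]),
   ("theoretical", ["Theoretical", "Research-oriented", "Abstract-thinking", "Analytical"]),
   ("social", ["Collaborative", "Team-centric", "Extroverted", "Social"]),
   ("independent", ["Independent", "Introverted", "Contemplative", "Self-directed"])]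

def determine_learning_style_py (traits : List String) : List String :=
  pvStyleMapping.foldl (fun learning_styles p =>
    let matches_ := traits.filter (fun t => p.2.contains t)
    if matches_.length ≥ 2 then PySem.Set.add learning_styles p.1
    else if matches_.length ≥ 1 then PySem.Set.add learning_styles p.1  -- partial match still counts
    else learning_styles) PySem.Set.empty

-- ===== PORT B =====
-- the module-level dict literal _TRAIT_TO_STYLE (reverse index trait → style)
def pvTraitToStyle : PySem.Dict String String :=
  PySem.Dict.ofList
    [("Visual-learner", "visual"), ("Aesthetic-sense", "visual"),
     ("Digital-art", "visual"), ("Spatial-thinking", "visual"),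
     ("Hands-on", "hands_on"), ("Practical", "hands_on"), ("Field-work", "hands_on"),
     ("Active", "hands_on"), ("Laboratory", "hands_on"),
     ("Theoretical", "theoretical"), ("Research-oriented", "theoretical"),
     ("Abstract-thinking", "theoretical"), ("Analytical", "theoretical"),
     ("Collaborative", "social"), ("Team-centric", "social"),
     ("Extroverted", "social"), ("Social", "social"),
     ("Independent", "independent"), ("Introverted", "independent"),
     ("Contemplative", "independent"), ("Self-directed", "independent")]

-- the module-level tuple _STYLES
def pvStyles : List String := ["visual", "hands_on", "theoretical", "social", "independent"]

def determine_learning_style_py_alt (traits : List String) : List String :=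
  let matched := traits.foldl (fun m t =>
    match pvTraitToStyle.get? t with
    | some style => PySem.Set.add m style
    | none => m) PySem.Set.empty
  -- {s for s in _STYLES if s in matched}
  pvStyles.foldl (fun out s => if matched.contains s then PySem.Set.add out s else out) PySem.Set.empty

-- ===== PRECONDITION & SPEC =====
def Spec_determine_learning_style_py (traits : List String) (out : List String) : Prop := out = determine_learning_style_py_alt traits
instance (traits : List String) (out : List String) : Decidable (Spec_determine_learning_style_py traits out) := by unfold Spec_determine_learning_style_py; infer_instance

-- ===== CLAIM (what is proved, stated in full; the proofs are below) =====
def Claim_equal_determine_learning_style_py : Prop := ∀ (traits : List String), Dom_determine_learning_style_py traits → Spec_determine_learning_style_py traits (determine_learning_style_py traits)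

-- ===== LEMMAS AND PROOFS =====

-- membership in B's matched set: exactly the styles the reverse index maps some input trait to
theorem pv_mem_matched (traits : List String) (m0 : List String) (x : String) :
    x ∈ traits.foldl (fun m t =>
      match pvTraitToStyle.get? t with
      | some style => PySem.Set.add m style
      | none => m) m0
    ↔ x ∈ m0 ∨ ∃ t ∈ traits, pvTraitToStyle.get? t = some x := by
  induction traits generalizing m0 with
  | nil => simp
  | cons t rest ih =>
    simp only [List.foldl_cons]
    cases h : pvTraitToStyle.get? t with
    | none =>
      rw [ih]
      constructor
      · rintro (hm | ⟨u, hu, hg⟩)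
        · exact Or.inl hm
        · exact Or.inr ⟨u, List.mem_cons_of_mem _ hu, hg⟩
      · rintro (hm | ⟨u, hu, hg⟩)
        · exact Or.inl hm
        · rcases List.mem_cons.mp hu with rfl | hu'
          · rw [h] at hg; exact absurd hg (by simp)
          · exact Or.inr ⟨u, hu', hg⟩
    | some s =>
      rw [ih]
      rw [PySem.Set.mem_add]
      constructor
      · rintro ((hm | rfl) | ⟨u, hu, hg⟩)
        · exact Or.inl hm
        · exact Or.inr ⟨t, List.mem_cons_self .., h⟩
        · exact Or.inr ⟨u, List.mem_cons_of_mem _ hu, hg⟩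
      · rintro (hm | ⟨u, hu, hg⟩)
        · exact Or.inl (Or.inl hm)
        · rcases List.mem_cons.mp hu with rfl | hu'
          · rw [h] at hg; exact Or.inl (Or.inr (Option.some.inj hg).symm)
          · exact Or.inr ⟨u, hu', hg⟩

-- the reverse index agrees with the forward mapping, pair by pair
theorem pv_index_char (s : String) (ts : List String) (hp : (s, ts) ∈ pvStyleMapping) (t : String) :
    pvTraitToStyle.get? t = some s ↔ t ∈ ts := by
  have hnd : pvTraitToStyle.keys.Nodup := by decide
  rw [PySem.Dict.get?_eq_some_iff_mem_items pvTraitToStyle t s hnd]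
  have hitems : pvTraitToStyle.items = [("Visual-learner", "visual"), ("Aesthetic-sense", "visual"),
     ("Digital-art", "visual"), ("Spatial-thinking", "visual"),
     ("Hands-on", "hands_on"), ("Practical", "hands_on"), ("Field-work", "hands_on"),
     ("Active", "hands_on"), ("Laboratory", "hands_on"),
     ("Theoretical", "theoretical"), ("Research-oriented", "theoretical"),
     ("Abstract-thinking", "theoretical"), ("Analytical", "theoretical"),
     ("Collaborative", "social"), ("Team-centric", "social"),
     ("Extroverted", "social"), ("Social", "social"),
     ("Independent", "independent"), ("Introverted", "independent"),
     ("Contemplative", "independent"), ("Self-directed", "independent")] := by rfl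
  rw [hitems]
  fin_cases hp <;> simp [Prod.ext_iff]

-- one step of A's style loop equals one step of B's final filter, when the reverse index characterises ts
theorem pv_step_eq (traits acc : List String) (s : String) (ts : List String)
    (h : ∀ t, pvTraitToStyle.get? t = some s ↔ t ∈ ts) :
    (if (traits.filter (fun t => ts.contains t)).length ≥ 2 then PySem.Set.add acc s
     else if (traits.filter (fun t => ts.contains t)).length ≥ 1 then PySem.Set.add acc s
     else acc)
    = (if (traits.foldl (fun m t =>
        match pvTraitToStyle.get? t with
        | some style => PySem.Set.add m style
        | none => m) PySem.Set.empty).contains s then PySem.Set.add acc s else acc) := by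
  by_cases hex : ∃ t ∈ traits, t ∈ ts
  · have hc : (traits.foldl (fun m t =>
        match pvTraitToStyle.get? t with
        | some style => PySem.Set.add m style
        | none => m) PySem.Set.empty).contains s = true := by
      rcases hex with ⟨t, ht, hts⟩
      rw [PySem.Set.contains_iff]
      exact (pv_mem_matched traits PySem.Set.empty s).mpr
        (Or.inr ⟨t, ht, (h t).mpr hts⟩)
    have hf : (traits.filter (fun t => ts.contains t)).length ≥ 1 := by
      rcases hex with ⟨t, ht, hts⟩
      have : t ∈ traits.filter (fun t => ts.contains t) := by
        simp [List.mem_filter, ht, hts]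
      calc 1 ≤ (traits.filter (fun t => ts.contains t)).length := List.length_pos_of_mem this
        _ = _ := rfl
    rw [hc]
    simp only [if_true]
    split_ifs <;> rfl
  · have hc : (traits.foldl (fun m t =>
        match pvTraitToStyle.get? t with
        | some style => PySem.Set.add m style
        | none => m) PySem.Set.empty).contains s = false := by
      rw [Bool.eq_false_iff]
      intro hcon
      rw [PySem.Set.contains_iff] at hcon
      rcases (pv_mem_matched traits PySem.Set.empty s).mp hcon with hm | ⟨t, ht, hg⟩
      · simp [PySem.Set.empty] at hm
      · exact hex ⟨t, ht, (h t).mp hg⟩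
    have hf : traits.filter (fun t => ts.contains t) = [] := by
      rw [List.filter_eq_nil_iff]
      intro t ht hts
      exact hex ⟨t, ht, by simpa using hts⟩
    rw [hc, hf]
    simp

-- the two style loops agree pair by pair
theorem pv_fold_eq (traits : List String) (pairs : List (String × List String))
    (h : ∀ p ∈ pairs, ∀ t, pvTraitToStyle.get? t = some p.1 ↔ t ∈ p.2) :
    ∀ acc : List String,
      pairs.foldl (fun learning_styles p =>
        let matches_ := traits.filter (fun t => p.2.contains t)
        if matches_.length ≥ 2 then PySem.Set.add learning_styles p.1
        else if matches_.length ≥ 1 then PySem.Set.add learning_styles p.1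
        else learning_styles) acc
      = (pairs.map Prod.fst).foldl (fun out s =>
          if (traits.foldl (fun m t =>
            match pvTraitToStyle.get? t with
            | some style => PySem.Set.add m style
            | none => m) PySem.Set.empty).contains s then PySem.Set.add out s else out) acc := by
  induction pairs with
  | nil => intro acc; rfl
  | cons p rest ih =>
    intro acc
    simp only [List.foldl_cons, List.map_cons]
    rw [show (let matches_ := traits.filter (fun t => p.2.contains t)
        if matches_.length ≥ 2 then PySem.Set.add acc p.1
        else if matches_.length ≥ 1 then PySem.Set.add acc p.1
        else acc) = _ from pv_step_eq traits acc p.1 p.2 (h p (List.mem_cons_self ..))]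
    exact ih (fun q hq => h q (List.mem_cons_of_mem _ hq)) _

-- ===== VERDICT (by name: the statement is the Claim_ definition above) =====
theorem determine_learning_style_py_spec : Claim_equal_determine_learning_style_py := by
  intro traits _
  show determine_learning_style_py traits = determine_learning_style_py_alt traits
  unfold determine_learning_style_py determine_learning_style_py_alt
  have hmap : pvStyleMapping.map Prod.fst = pvStyles := by rfl
  rw [← hmap]
  exact pv_fold_eq traits pvStyleMapping
    (fun p hp => pv_index_char p.1 p.2 hp) PySem.Set.empty
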